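-- pv_equiv track=rewrite | github.com/vuthehung/Python | code ptit/Bien va kieu du lieu/tong_tich.py | ind_l
-- ===== SOURCE A (Python) =====
-- def check(n):
--     for i in range(0, len(n)):
--         if i % 2 != 0:
--             if n[i] != '0':
--                 return False
--                 break
--     return True
--
-- def ind_l(n):
--     mul = 1
--     if check(n):
--         return 0
--     for i in range(1, len(n)):
--         if i % 2 != 0:
--             if n[i] == '0':
--                 continue
--             mul *= int(n[i])
--     return mul
-- ===== SOURCE B (Python) =====
-- def ind_l(n):
--     mul = 1
--     found = False
--     for i in range(1, len(n), 2):
--         d = n[i]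
--         if d != '0':
--             found = True
--             mul *= int(d)
--     return mul if found else 0
-- ===== Notes on version B (the rewrite author's own statement) =====
-- stated objective: simpler
-- what changed: Replaces A's two passes (a separate check() pre-scan over all indices plus a second full-range product loop that tests parity of every index) with a single pass over only the odd indices (range(1, len, 2)) carrying a found flag that yields the 0-for-no-nonzero-digit result directly.
import Mathlib
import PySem

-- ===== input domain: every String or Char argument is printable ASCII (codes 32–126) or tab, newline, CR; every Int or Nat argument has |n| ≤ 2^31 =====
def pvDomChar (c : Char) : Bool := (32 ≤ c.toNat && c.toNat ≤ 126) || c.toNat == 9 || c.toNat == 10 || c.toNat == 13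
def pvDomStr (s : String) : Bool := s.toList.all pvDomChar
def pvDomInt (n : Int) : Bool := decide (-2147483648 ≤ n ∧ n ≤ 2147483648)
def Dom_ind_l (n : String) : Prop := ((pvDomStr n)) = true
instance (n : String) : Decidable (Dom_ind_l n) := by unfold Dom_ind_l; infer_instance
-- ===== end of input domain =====

-- B merges A's check() pre-scan and product loop into one pass over the odd indices with a found flag (simpler).


-- ===== PORT A =====
-- check(n): scan all indices; a nonzero char at an odd index returns False.
-- Indices come from pyRange so are always in range: pyGetD's default is never read.
def checkLoopA (cs : List Char) : List Int → Bool
  | [] => true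
  | i :: rest =>
    if PySem.Int.mod i 2 ≠ 0 then
      if PySem.List.pyGetD cs i ' ' ≠ '0' then false
      else checkLoopA cs rest
    else checkLoopA cs rest

-- the product loop of ind_l; int(n[i]) is exact under Pre_ (odd-index chars are digits),
-- (PySem.Int.ofChars? [c]).getD 0 = int(c) there.
def mulLoopA (cs : List Char) : List Int → Int → Int
  | [], mul => mul
  | i :: rest, mul =>
    if PySem.Int.mod i 2 ≠ 0 then
      if PySem.List.pyGetD cs i ' ' = '0' then mulLoopA cs rest mul
      else mulLoopA cs rest (mul * (PySem.Int.ofChars? [PySem.List.pyGetD cs i ' ']).getD 0)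
    else mulLoopA cs rest mul

def ind_l (n : String) : Int :=
  let cs := n.toList
  if checkLoopA cs (PySem.List.pyRange 0 (PySem.List.len cs) 1) then 0
  else mulLoopA cs (PySem.List.pyRange 1 (PySem.List.len cs) 1) 1

-- ===== PORT B =====
-- single pass over range(1, len, 2) with a found flag
def altLoop (cs : List Char) : List Int → Int → Bool → Int
  | [], mul, found => if found then mul else 0
  | i :: rest, mul, found =>
    if PySem.List.pyGetD cs i ' ' ≠ '0' then
      altLoop cs rest (mul * (PySem.Int.ofChars? [PySem.List.pyGetD cs i ' ']).getD 0) true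
    else altLoop cs rest mul found

def ind_l_alt (n : String) : Int :=
  altLoop n.toList (PySem.List.pyRange 1 (PySem.List.len n.toList) 2) 1 false

-- ===== PRECONDITION & SPEC =====
-- Pre_ excludes exactly the inputs where Python A raises ValueError: a non-digit
-- character at an odd index (int(n[i]) fails there; B raises on the same inputs).
def Pre_ind_l (n : String) : Prop :=
  ∀ i, (h : i < n.toList.length) → i % 2 = 1 → ('0' ≤ n.toList[i] ∧ n.toList[i] ≤ '9')
instance (n : String) : Decidable (Pre_ind_l n) := by unfold Pre_ind_l; infer_instance
def pvWitness_ind_l : String := "1234"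

def Spec_ind_l (n : String) (out : Int) : Prop := out = ind_l_alt n
instance (n : String) (out : Int) : Decidable (Spec_ind_l n out) := by unfold Spec_ind_l; infer_instance

-- ===== CLAIM (what is proved, stated in full; the proofs are below) =====
def Claim_equal_ind_l : Prop := ∀ (n : String), Dom_ind_l n → Pre_ind_l n → Spec_ind_l n (ind_l n)

-- ===== LEMMAS AND PROOFS =====

-- proof-side spec functions over the list of odd indices (step-2 range)
def allZ (cs : List Char) (is : List Int) : Bool :=
  is.all (fun i => PySem.List.pyGetD cs i ' ' == '0')

def prodNZ (cs : List Char) : List Int → Int → Int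
  | [], mul => mul
  | i :: rest, mul =>
    if PySem.List.pyGetD cs i ' ' = '0' then prodNZ cs rest mul
    else prodNZ cs rest (mul * (PySem.Int.ofChars? [PySem.List.pyGetD cs i ' ']).getD 0)

lemma pyRange_two_cons (a b : Int) (h : a < b) :
    PySem.List.pyRange a b 2 = a :: PySem.List.pyRange (a + 2) b 2 := by
  rw [PySem.List.pyRange_of_pos a b (by norm_num),
      PySem.List.pyRange_of_pos (a + 2) b (by norm_num)]
  have hc : (if a < b then ((b - a + 2 - 1) / 2).toNat else 0)
      = (if a + 2 < b then ((b - (a + 2) + 2 - 1) / 2).toNat else 0) + 1 := by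
    split_ifs <;> omega
  rw [hc, List.range_succ_eq_map, List.map_cons, List.map_map]
  congr 1
  · simp
  · apply List.map_congr_left
    intro k _
    simp only [Function.comp_apply]
    push_cast
    ring

lemma pyRange_two_nil (a b : Int) (h : b ≤ a) : PySem.List.pyRange a b 2 = [] := by
  rw [PySem.List.pyRange_of_pos a b (by norm_num)]
  have : (if a < b then ((b - a + 2 - 1) / 2).toNat else 0) = 0 := by split_ifs <;> omega
  simp [this]

-- A's check over range(a, b) equals allZ over the odd indices in [a, b)
lemma checkLoopA_eq (cs : List Char) (b : Int) :
    ∀ (m : Nat) (a : Int), (b - a).toNat ≤ m →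
      checkLoopA cs (PySem.List.pyRange a b 1)
        = allZ cs (PySem.List.pyRange (if PySem.Int.mod a 2 = 1 then a else a + 1) b 2) := by
  intro m
  induction m with
  | zero =>
    intro a hm
    have hba : b ≤ a := by omega
    rw [PySem.List.pyRange_one_eq_nil hba, pyRange_two_nil]
    · rfl
    · split_ifs <;> omega
  | succ m ih =>
    intro a hm
    rcases le_or_gt b a with hba | hba
    · rw [PySem.List.pyRange_one_eq_nil hba, pyRange_two_nil]
      · rfl
      · split_ifs <;> omega
    · rw [PySem.List.pyRange_one_cons hba]
      have hmod := PySem.Int.mod_eq_emod_of_pos (a := a) (b := 2) (by norm_num)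
      have hmod1 := PySem.Int.mod_eq_emod_of_pos (a := a + 1) (b := 2) (by norm_num)
      have hplus : a + 1 + 1 = a + 2 := by ring
      rcases Int.emod_two_eq a with he | he
      · -- a even: check skips index a
        have h0 : PySem.Int.mod a 2 = 0 := by rw [hmod, he]
        have h1 : PySem.Int.mod (a + 1) 2 = 1 := by rw [hmod1]; omega
        have lhs : checkLoopA cs (a :: PySem.List.pyRange (a + 1) b 1)
            = checkLoopA cs (PySem.List.pyRange (a + 1) b 1) := by
          simp [checkLoopA, he]
        rw [lhs, ih (a + 1) (by omega), if_pos h1, if_neg (by rw [h0]; norm_num)]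
      · -- a odd
        have h0 : PySem.Int.mod a 2 = 1 := by rw [hmod, he]
        have h1 : PySem.Int.mod (a + 1) 2 = 0 := by rw [hmod1]; omega
        rw [if_pos h0, pyRange_two_cons a b hba]
        by_cases hc : PySem.List.pyGetD cs a ' ' = '0'
        · have lhs : checkLoopA cs (a :: PySem.List.pyRange (a + 1) b 1)
              = checkLoopA cs (PySem.List.pyRange (a + 1) b 1) := by
            simp [checkLoopA, he, hc]
          rw [lhs, ih (a + 1) (by omega), if_neg (by rw [h1]; norm_num), hplus]
          simp [allZ, hc]
        · have lhs : checkLoopA cs (a :: PySem.List.pyRange (a + 1) b 1) = false := by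
            simp [checkLoopA, he, hc]
          rw [lhs]
          simp [allZ, hc]

-- A's product loop over range(a, b) equals prodNZ over the odd indices in [a, b)
lemma mulLoopA_eq (cs : List Char) (b : Int) :
    ∀ (m : Nat) (a : Int) (mul : Int), (b - a).toNat ≤ m →
      mulLoopA cs (PySem.List.pyRange a b 1) mul
        = prodNZ cs (PySem.List.pyRange (if PySem.Int.mod a 2 = 1 then a else a + 1) b 2) mul := by
  intro m
  induction m with
  | zero =>
    intro a mul hm
    have hba : b ≤ a := by omega
    rw [PySem.List.pyRange_one_eq_nil hba, pyRange_two_nil]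
    · rfl
    · split_ifs <;> omega
  | succ m ih =>
    intro a mul hm
    rcases le_or_gt b a with hba | hba
    · rw [PySem.List.pyRange_one_eq_nil hba, pyRange_two_nil]
      · rfl
      · split_ifs <;> omega
    · rw [PySem.List.pyRange_one_cons hba]
      have hmod := PySem.Int.mod_eq_emod_of_pos (a := a) (b := 2) (by norm_num)
      have hmod1 := PySem.Int.mod_eq_emod_of_pos (a := a + 1) (b := 2) (by norm_num)
      have hplus : a + 1 + 1 = a + 2 := by ring
      rcases Int.emod_two_eq a with he | he
      · -- a even: loop skips index a
        have h0 : PySem.Int.mod a 2 = 0 := by rw [hmod, he]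
        have h1 : PySem.Int.mod (a + 1) 2 = 1 := by rw [hmod1]; omega
        have lhs : mulLoopA cs (a :: PySem.List.pyRange (a + 1) b 1) mul
            = mulLoopA cs (PySem.List.pyRange (a + 1) b 1) mul := by
          simp [mulLoopA, he]
        rw [lhs, ih (a + 1) mul (by omega), if_pos h1, if_neg (by rw [h0]; norm_num)]
      · -- a odd
        have h0 : PySem.Int.mod a 2 = 1 := by rw [hmod, he]
        have h1 : PySem.Int.mod (a + 1) 2 = 0 := by rw [hmod1]; omega
        rw [if_pos h0, pyRange_two_cons a b hba]
        by_cases hc : PySem.List.pyGetD cs a ' ' = '0'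
        · have lhs : mulLoopA cs (a :: PySem.List.pyRange (a + 1) b 1) mul
              = mulLoopA cs (PySem.List.pyRange (a + 1) b 1) mul := by
            simp [mulLoopA, he, hc]
          rw [lhs, ih (a + 1) mul (by omega), if_neg (by rw [h1]; norm_num), hplus]
          simp [prodNZ, hc]
        · have lhs : mulLoopA cs (a :: PySem.List.pyRange (a + 1) b 1) mul
              = mulLoopA cs (PySem.List.pyRange (a + 1) b 1)
                  (mul * (PySem.Int.ofChars? [PySem.List.pyGetD cs a ' ']).getD 0) := by
            simp [mulLoopA, he, hc]
          rw [lhs, ih (a + 1) _ (by omega), if_neg (by rw [h1]; norm_num), hplus]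
          simp [prodNZ, hc]

-- B's loop: returns 0 iff the flag never gets set, otherwise the running product
lemma altLoop_eq (cs : List Char) :
    ∀ (is : List Int) (mul : Int) (found : Bool),
      altLoop cs is mul found
        = if !found && allZ cs is then 0 else prodNZ cs is mul := by
  intro is
  induction is with
  | nil =>
    intro mul found
    cases found <;> simp [altLoop, allZ, prodNZ]
  | cons i rest ih =>
    intro mul found
    by_cases hc : PySem.List.pyGetD cs i ' ' = '0'
    · simp only [altLoop, hc, ne_eq, not_true_eq_false, if_false]
      rw [ih mul found]
      simp [allZ, prodNZ, hc]
    · simp only [altLoop, ne_eq, hc, not_false_eq_true, if_true]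
      rw [ih (mul * (PySem.Int.ofChars? [PySem.List.pyGetD cs i ' ']).getD 0) true]
      simp [allZ, prodNZ, hc]

-- ===== VERDICT (by name: the statement is the Claim_ definition above) =====
theorem ind_l_spec : Claim_equal_ind_l := by
  intro n _ _
  unfold Spec_ind_l ind_l ind_l_alt
  set cs := n.toList with hcs
  set b : Int := PySem.List.len cs with hb
  have hA := checkLoopA_eq cs b (b - 0).toNat 0 le_rfl
  have h0 : PySem.Int.mod (0 : Int) 2 = 0 := by decide
  rw [if_neg (by rw [h0]; norm_num), zero_add] at hA
  rw [altLoop_eq cs (PySem.List.pyRange 1 b 2) 1 false]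
  by_cases hz : allZ cs (PySem.List.pyRange 1 b 2) = true
  · rw [if_pos (hA.trans hz), if_pos (by simp [hz])]
  · rw [if_neg (by rw [hA]; exact hz), if_neg (by simp [hz])]
    have hM := mulLoopA_eq cs b (b - 1).toNat 1 1 le_rfl
    have h1 : PySem.Int.mod (1 : Int) 2 = 1 := by decide
    rw [if_pos h1] at hM
    exact hM
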